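-- pv_equiv track=rewrite | github.com/ZXY39/G3KU-Agent | main/runtime/node_runner.py | _extract_json_object_candidates
-- ===== SOURCE A (Python) =====
-- from typing import Any
--
-- def _extract_json_object_candidates(content: Any) -> list[str]:
--     text = str(content or '')
--     candidates: list[str] = []
--     start_index: int | None = None
--     depth = 0
--     in_string = False
--     escape = False
--     for index, char in enumerate(text):
--         if in_string:
--             if escape:
--                 escape = False
--             elif char == '\\':
--                 escape = True
--             elif char == '"':
--                 in_string = False
--             continue
--         if char == '"':
--             in_string = True
--             continue
--         if char == '{':
--             if depth == 0:
--                 start_index = index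
--             depth += 1
--             continue
--         if char == '}' and depth > 0:
--             depth -= 1
--             if depth == 0 and start_index is not None:
--                 candidates.append(text[start_index : index + 1])
--                 start_index = None
--     candidates.reverse()
--     return candidates
-- ===== SOURCE B (Python) =====
-- def _extract_json_object_candidates(content):
--     text = str(content or '')
--     n = len(text)
--     candidates = []
--     start_index = None
--     depth = 0
--     i = 0
--     while i < n:
--         char = text[i]
--         if char == '"':
--             # consume the whole string literal (skipping escaped chars) in one inner loop
--             j = i + 1
--             while j < n:
--                 if text[j] == '\\':
--                     j += 2
--                 elif text[j] == '"':
--                     j += 1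
--                     break
--                 else:
--                     j += 1
--             i = j
--             continue
--         if char == '{':
--             if depth == 0:
--                 start_index = i
--             depth += 1
--         elif char == '}' and depth > 0:
--             depth -= 1
--             if depth == 0 and start_index is not None:
--                 candidates.append(text[start_index : i + 1])
--                 start_index = None
--         i += 1
--     candidates.reverse()
--     return candidates
-- ===== Notes on version B (the rewrite author's own statement) =====
-- stated objective: alternative
-- what changed: Replaced A's flat for-loop state machine with in_string/escape flags by an index-driven while loop with no flags, where an inner loop consumes each whole string literal (jumping two positions past a backslash) in one step.
import Mathlib
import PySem

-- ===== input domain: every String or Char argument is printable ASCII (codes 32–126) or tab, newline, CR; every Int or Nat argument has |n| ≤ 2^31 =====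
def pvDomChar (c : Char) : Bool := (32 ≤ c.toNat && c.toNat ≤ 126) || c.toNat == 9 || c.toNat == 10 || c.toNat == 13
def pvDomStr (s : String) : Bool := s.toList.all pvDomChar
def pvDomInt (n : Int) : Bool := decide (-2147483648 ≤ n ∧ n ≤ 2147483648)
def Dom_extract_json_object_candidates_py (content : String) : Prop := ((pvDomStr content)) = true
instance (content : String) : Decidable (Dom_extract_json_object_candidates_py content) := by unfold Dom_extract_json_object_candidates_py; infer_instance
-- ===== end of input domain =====

-- B replaces A's flat in_string/escape flag machine by an index-driven loop with an inner
-- loop that consumes a whole string literal at once (objective: alternative decomposition).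

-- ===== PORT A =====
-- one step per character of A's for-loop; state: (start_index, depth, in_string, escape, candidates)
def pvLoopA (text : List Char) : List Char → Nat → Option Nat → Nat → Bool → Bool → List String → List String
  | [], _, _, _, _, _, cands => cands.reverse
  | c :: rest, i, start, depth, instr, esc, cands =>
    if instr then
      if esc then pvLoopA text rest (i+1) start depth true false cands
      else if c = '\\' then pvLoopA text rest (i+1) start depth true true cands
      else if c = '"' then pvLoopA text rest (i+1) start depth false false cands
      else pvLoopA text rest (i+1) start depth true false cands
    else if c = '"' then pvLoopA text rest (i+1) start depth true false cands
    else if c = '{' then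
      pvLoopA text rest (i+1) (if depth = 0 then some i else start) (depth+1) false false cands
    else if c = '}' ∧ 0 < depth then
      if depth - 1 = 0 ∧ start.isSome then
        pvLoopA text rest (i+1) none (depth-1) false false
          (cands ++ [String.ofList (PySem.List.slice text (some ((start.getD 0 : Nat) : Int)) (some ((i : Int) + 1)))])
      else pvLoopA text rest (i+1) start (depth-1) false false cands
    else pvLoopA text rest (i+1) start depth false false cands

-- str(content or '') is content itself for a string argument (empty or not)
def extract_json_object_candidates_py (content : String) : List String :=
  pvLoopA content.toList content.toList 0 none 0 false false []

-- ===== PORT B =====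
-- inner while loop of B: advance past a string literal (after the opening quote at index j-1)
def pvSkipStr : List Char → Nat → List Char × Nat
  | [], j => ([], j)
  | c :: rest, j =>
    if c = '\\' then pvSkipStr rest.tail (j+2)
    else if c = '"' then (rest, j+1)
    else pvSkipStr rest (j+1)
termination_by l => l.length
decreasing_by
  · simp [List.length_tail]
  · exact Nat.lt_succ_self _

theorem pvSkipStr_len_le (l : List Char) (j : Nat) : (pvSkipStr l j).1.length ≤ l.length := by
  induction l, j using pvSkipStr.induct with
  | case1 => simp [pvSkipStr]
  | case2 rest j ih =>
      rw [pvSkipStr, if_pos rfl]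
      refine Nat.le_trans ih ?_
      simp [List.length_tail]; omega
  | case3 rest j hb => simp [pvSkipStr, hb]
  | case4 c rest j hb hq ih =>
      rw [pvSkipStr, if_neg hb, if_neg hq]
      exact Nat.le_trans ih (Nat.le_succ _)

-- outer while loop of B; state: (start_index, depth, candidates)
def pvLoopB (text : List Char) : List Char → Nat → Option Nat → Nat → List String → List String
  | [], _, _, _, cands => cands.reverse
  | c :: rest, i, start, depth, cands =>
    if c = '"' then
      pvLoopB text (pvSkipStr rest (i+1)).1 (pvSkipStr rest (i+1)).2 start depth cands
    else if c = '{' then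
      pvLoopB text rest (i+1) (if depth = 0 then some i else start) (depth+1) cands
    else if c = '}' ∧ 0 < depth then
      if depth - 1 = 0 ∧ start.isSome then
        pvLoopB text rest (i+1) none (depth-1)
          (cands ++ [String.ofList (PySem.List.slice text (some ((start.getD 0 : Nat) : Int)) (some ((i : Int) + 1)))])
      else pvLoopB text rest (i+1) start (depth-1) cands
    else pvLoopB text rest (i+1) start depth cands
termination_by l => l.length
decreasing_by
  · exact Nat.lt_succ_of_le (pvSkipStr_len_le rest (i+1))
  all_goals exact Nat.lt_succ_self _

def extract_json_object_candidates_py_alt (content : String) : List String :=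
  pvLoopB content.toList content.toList 0 none 0 []

-- ===== PRECONDITION & SPEC =====
def Spec_extract_json_object_candidates_py (content : String) (out : List String) : Prop := out = extract_json_object_candidates_py_alt content
instance (content : String) (out : List String) : Decidable (Spec_extract_json_object_candidates_py content out) := by unfold Spec_extract_json_object_candidates_py; infer_instance

-- ===== CLAIM (what is proved, stated in full; the proofs are below) =====
def Claim_equal_extract_json_object_candidates_py : Prop := ∀ (content : String), Dom_extract_json_object_candidates_py content → Spec_extract_json_object_candidates_py content (extract_json_object_candidates_py content)

-- ===== LEMMAS AND PROOFS =====

-- A in the in_string (not escaped) state behaves like skipping the string literal at once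
theorem pvLoopA_instr (text : List Char) (l : List Char) (j : Nat)
    (start : Option Nat) (depth : Nat) (cands : List String) :
    pvLoopA text l j start depth true false cands
      = pvLoopA text (pvSkipStr l j).1 (pvSkipStr l j).2 start depth false false cands := by
  induction l, j using pvSkipStr.induct with
  | case1 j => simp [pvSkipStr, pvLoopA]
  | case2 rest j ih =>
      rw [pvSkipStr, if_pos rfl, pvLoopA, if_pos rfl, if_neg (by simp), if_pos rfl]
      cases rest with
      | nil => simp [pvSkipStr, pvLoopA]
      | cons c' rest' =>
          rw [pvLoopA, if_pos rfl, if_pos rfl]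
          simpa using ih
  | case3 rest j hb =>
      rw [pvSkipStr, if_neg hb, if_pos rfl, pvLoopA, if_pos rfl, if_neg (by simp), if_neg hb, if_pos rfl]
  | case4 c rest j hb hq ih =>
      rw [pvSkipStr, if_neg hb, if_neg hq, pvLoopA, if_pos rfl, if_neg (by simp), if_neg hb, if_neg hq]
      exact ih

-- main loop equivalence: A's flat state machine equals B's nested loop
theorem pvLoopA_eq_pvLoopB (text : List Char) (l : List Char) (i : Nat)
    (start : Option Nat) (depth : Nat) (cands : List String) :
    pvLoopA text l i start depth false false cands = pvLoopB text l i start depth cands := by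
  induction l, i, start, depth, cands using pvLoopB.induct (text := text) with
  | case1 => simp [pvLoopA, pvLoopB]
  | case2 rest i start depth cands ih =>
      rw [pvLoopB, if_pos rfl, pvLoopA, if_neg (by simp), if_pos rfl, pvLoopA_instr]
      exact ih
  | case3 rest i start depth cands hq ih =>
      rw [pvLoopB, if_neg hq, if_pos rfl, pvLoopA, if_neg (by simp), if_neg hq, if_pos rfl]
      exact ih
  | case4 c rest i start depth cands hq hb hc hs ih =>
      rw [pvLoopB, if_neg hq, if_neg hb, if_pos hc, if_pos hs,
          pvLoopA, if_neg (by simp), if_neg hq, if_neg hb, if_pos hc, if_pos hs]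
      exact ih
  | case5 c rest i start depth cands hq hb hc hs ih =>
      rw [pvLoopB, if_neg hq, if_neg hb, if_pos hc, if_neg hs,
          pvLoopA, if_neg (by simp), if_neg hq, if_neg hb, if_pos hc, if_neg hs]
      exact ih
  | case6 c rest i start depth cands hq hb hc ih =>
      rw [pvLoopB, if_neg hq, if_neg hb, if_neg hc,
          pvLoopA, if_neg (by simp), if_neg hq, if_neg hb, if_neg hc]
      exact ih

-- ===== VERDICT (by name: the statement is the Claim_ definition above) =====
theorem extract_json_object_candidates_py_spec : Claim_equal_extract_json_object_candidates_py := by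
  intro content _
  unfold Spec_extract_json_object_candidates_py extract_json_object_candidates_py extract_json_object_candidates_py_alt
  exact pvLoopA_eq_pvLoopB ..
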